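-- pv_equiv track=rewrite | github.com/wukundi931211/test | appium_po/UserSpace/utils/utils_base.py | get_type_name_rect
-- ===== SOURCE A (Python) =====
-- def get_type_name_rect(type_name_rect_list, type_text=None, name_text=None, type_equal=True, name_equal=True,
--                        name_in=None, just_name=None):
--     """
--     type_text  type等于某个值
--     name_text  type等于某个值
--     含有某个值  name_equal=False  name_in=True
--
--     """
--
--     result_list = []
--     for i in range(len(type_name_rect_list)):
--         if just_name == None:
--             type_name = type_name_rect_list[i].split('[')[0]
--             type = type_name.split('&&')[0]
--             name = type_name.split('&&')[1]
--             # self.info('---type-name--')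
--             # self.info(type_name)
--             # self.info(type)
--             # self.info(name)
--         else:
--             name = type_name_rect_list[i]
--
--         if type_text == None and name_text != None:
--             if name_equal:
--                 if name_text == name:
--                     result_list.append(type_name_rect_list[i])
--             elif name_equal == False and name_in == None:
--                 if name_text != name:
--                     result_list.append(type_name_rect_list[i])
--             elif name_equal == False and name_in != None:
--                 if name_text in name:
--                     result_list.append(type_name_rect_list[i])
--
--         if type_text != None and name_text == None:
--             if type_equal:
--                 if type == type_text:
--                     result_list.append(type_name_rect_list[i])
--             else:
--                 if type != type_text:
--                     result_list.append(type_name_rect_list[i])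
--
--         if type_text != None and name_text != None:
--             if type_equal and name_equal:  # 同时相等
--                 if type == type_text and name == name_text:
--                     result_list.append(type_name_rect_list[i])
--             elif not type_equal and name_equal:
--                 if type != type_text and name == name_text:
--                     result_list.append(type_name_rect_list[i])
--             elif type_equal and not name_equal:
--                 if type == type_text and name != name_text:
--                     result_list.append(type_name_rect_list[i])
--             elif not type_equal and not name_equal:
--                 if type != type_text and name != name_text:
--                     result_list.append(type_name_rect_list[i])
--             else:
--                 assert '错误' == 'get_type_name_rect 出现了不存在的情况'
--     # self.info('---get_type_name_rect---')
--     # self.info_list_len(result_list)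
--     return result_list
-- ===== SOURCE B (Python) =====
-- def get_type_name_rect(type_name_rect_list, type_text=None, name_text=None, type_equal=True, name_equal=True,
--                        name_in=None, just_name=None):
--     # Staged passes: parse the names once, build independent boolean masks for the
--     # type condition and the name condition, then zip-combine the masks.
--     if just_name is None:
--         names = [e.split('[')[0].split('&&')[1] for e in type_name_rect_list]
--     else:
--         names = list(type_name_rect_list)
--
--     if type_text is None and name_text is None:
--         return []
--
--     if type_text is None:
--         tmask = [True] * len(type_name_rect_list)
--     else:
--         tmask = [(e.split('[')[0].split('&&')[0] == type_text) == type_equal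
--                  for e in type_name_rect_list]
--
--     if name_text is None:
--         nmask = [True] * len(type_name_rect_list)
--     elif type_text is None and not name_equal and name_in is not None:
--         nmask = [name_text in nm for nm in names]
--     else:
--         nmask = [(nm == name_text) == name_equal for nm in names]
--
--     return [e for e, t, m in zip(type_name_rect_list, tmask, nmask) if t and m]
-- ===== Notes on version B (the rewrite author's own statement) =====
-- stated objective: alternative
-- what changed: B replaces A's single loop with a per-element cascade of three if-blocks by staged passes: it parses the names once, builds independent boolean masks for the type condition and the name condition, and zip-combines list and masks into the result.
import Mathlib
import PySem

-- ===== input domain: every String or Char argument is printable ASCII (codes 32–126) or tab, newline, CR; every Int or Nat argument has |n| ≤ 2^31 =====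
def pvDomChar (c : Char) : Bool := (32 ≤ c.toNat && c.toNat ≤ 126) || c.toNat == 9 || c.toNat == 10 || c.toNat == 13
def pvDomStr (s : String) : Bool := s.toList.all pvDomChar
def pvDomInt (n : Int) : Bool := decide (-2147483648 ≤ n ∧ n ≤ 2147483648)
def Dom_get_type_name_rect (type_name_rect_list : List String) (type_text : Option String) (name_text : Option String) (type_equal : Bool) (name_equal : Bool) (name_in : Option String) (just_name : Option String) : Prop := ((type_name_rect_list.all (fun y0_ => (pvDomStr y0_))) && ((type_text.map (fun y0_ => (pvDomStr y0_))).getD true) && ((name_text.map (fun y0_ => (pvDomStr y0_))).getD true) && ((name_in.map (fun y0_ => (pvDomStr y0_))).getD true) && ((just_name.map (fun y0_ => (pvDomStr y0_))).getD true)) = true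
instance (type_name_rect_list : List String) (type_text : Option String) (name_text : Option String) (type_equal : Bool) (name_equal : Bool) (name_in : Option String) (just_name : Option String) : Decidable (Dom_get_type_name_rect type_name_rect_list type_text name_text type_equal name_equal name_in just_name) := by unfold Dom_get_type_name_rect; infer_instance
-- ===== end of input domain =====

-- B replaces A's per-element cascade of three if-blocks by staged passes (parse names once, build type/name boolean masks, zip-combine); return-value equivalence is proved on Pre_ (A raises outside it).


-- Shared parse helpers (both Pythons call split('[')[0] / split('&&') identically).
def pvPre (e : String) : String := ((PySem.Str.split? e "[").getD []).headD ""
def pvTypeOf (e : String) : String := ((PySem.Str.split? (pvPre e) "&&").getD []).headD ""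
def pvNameOf (e : String) : String := (PySem.List.pyGet? ((PySem.Str.split? (pvPre e) "&&").getD []) 1).getD ""

-- ===== PORT A =====
-- One loop iteration of A: parse the element, then the three independent if-blocks in A's order.
-- Where Python A raises (IndexError on a missing '&&' via split('&&')[1], UnboundLocalError on the
-- unassigned local `type` when just_name is set), the port substitutes "" via getD / the else-branch —
-- exactly those inputs are excluded by Pre_.
def pvStepA (type_text : Option String) (name_text : Option String) (type_equal : Bool) (name_equal : Bool) (name_in : Option String) (just_name : Option String) (acc : List String) (e : String) : List String :=
  let ty := if just_name = none then pvTypeOf e else ""   -- "" stands for Python's unassigned local `type`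
  let nm := if just_name = none then pvNameOf e else e
  let acc :=
    if type_text = none ∧ name_text ≠ none then
      if name_equal then (if name_text = some nm then acc ++ [e] else acc)
      else if name_equal = false ∧ name_in = none then (if name_text ≠ some nm then acc ++ [e] else acc)
      else if name_equal = false ∧ name_in ≠ none then (if PySem.Str.isIn (name_text.getD "") nm then acc ++ [e] else acc)
      else acc
    else acc
  let acc :=
    if type_text ≠ none ∧ name_text = none then
      if type_equal then (if type_text = some ty then acc ++ [e] else acc)
      else (if type_text ≠ some ty then acc ++ [e] else acc)
    else acc
  if type_text ≠ none ∧ name_text ≠ none then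
    if type_equal ∧ name_equal then (if type_text = some ty ∧ name_text = some nm then acc ++ [e] else acc)
    else if ¬type_equal ∧ name_equal then (if type_text ≠ some ty ∧ name_text = some nm then acc ++ [e] else acc)
    else if type_equal ∧ ¬name_equal then (if type_text = some ty ∧ name_text ≠ some nm then acc ++ [e] else acc)
    else if ¬type_equal ∧ ¬name_equal then (if type_text ≠ some ty ∧ name_text ≠ some nm then acc ++ [e] else acc)
    else acc                                                        -- Python's unreachable assert branch
  else acc

def get_type_name_rect (type_name_rect_list : List String) (type_text : Option String) (name_text : Option String) (type_equal : Bool) (name_equal : Bool) (name_in : Option String) (just_name : Option String) : List String :=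
  type_name_rect_list.foldl (pvStepA type_text name_text type_equal name_equal name_in just_name) []

-- ===== PORT B =====
-- Source B's locals `names`, `tmask`, `nmask` become the helper defs pvNames/pvTMask/pvNMask.
def pvNames (just_name : Option String) (l : List String) : List String :=
  if just_name = none then l.map pvNameOf else l

def pvTMask (l : List String) (type_text : Option String) (type_equal : Bool) : List Bool :=
  match type_text with
  | none => List.replicate l.length true
  | some t => l.map (fun e => (pvTypeOf e == t) == type_equal)

def pvNMask (l : List String) (type_text name_text : Option String) (name_equal : Bool) (name_in just_name : Option String) : List Bool :=
  match name_text with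
  | none => List.replicate l.length true
  | some nv =>
    if type_text = none ∧ name_equal = false ∧ name_in ≠ none then (pvNames just_name l).map (fun nm => PySem.Str.isIn nv nm)
    else (pvNames just_name l).map (fun nm => (nm == nv) == name_equal)

def get_type_name_rect_alt (type_name_rect_list : List String) (type_text : Option String) (name_text : Option String) (type_equal : Bool) (name_equal : Bool) (name_in : Option String) (just_name : Option String) : List String :=
  if type_text = none ∧ name_text = none then []
  else
    ((type_name_rect_list.zip ((pvTMask type_name_rect_list type_text type_equal).zip (pvNMask type_name_rect_list type_text name_text name_equal name_in just_name))).filter (fun p => p.2.1 && p.2.2)).map Prod.fst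

-- ===== PRECONDITION & SPEC =====
-- Pre_ excludes exactly the inputs where Python A raises: with just_name None, an element whose part
-- before '[' has no '&&' (IndexError); with just_name set and type_text set, any non-empty list
-- (UnboundLocalError on the local `type`).
def Pre_get_type_name_rect (type_name_rect_list : List String) (type_text : Option String) (name_text : Option String) (type_equal : Bool) (name_equal : Bool) (name_in : Option String) (just_name : Option String) : Prop :=
  (just_name = none → ∀ e ∈ type_name_rect_list, PySem.Str.isIn "&&" (((PySem.Str.split? e "[").getD []).headD "") = true) ∧
  (just_name ≠ none → type_text ≠ none → type_name_rect_list = [])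
instance (type_name_rect_list : List String) (type_text : Option String) (name_text : Option String) (type_equal : Bool) (name_equal : Bool) (name_in : Option String) (just_name : Option String) : Decidable (Pre_get_type_name_rect type_name_rect_list type_text name_text type_equal name_equal name_in just_name) := by unfold Pre_get_type_name_rect; infer_instance

def pvWitness_get_type_name_rect : List String × Option String × Option String × Bool × Bool × Option String × Option String :=
  (["a&&b[1]", "c&&ab[2]"], some "a", none, true, true, none, none)

def Spec_get_type_name_rect (type_name_rect_list : List String) (type_text : Option String) (name_text : Option String) (type_equal : Bool) (name_equal : Bool) (name_in : Option String) (just_name : Option String) (out : List String) : Prop := out = get_type_name_rect_alt type_name_rect_list type_text name_text type_equal name_equal name_in just_name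
instance (type_name_rect_list : List String) (type_text : Option String) (name_text : Option String) (type_equal : Bool) (name_equal : Bool) (name_in : Option String) (just_name : Option String) (out : List String) : Decidable (Spec_get_type_name_rect type_name_rect_list type_text name_text type_equal name_equal name_in just_name out) := by unfold Spec_get_type_name_rect; infer_instance

-- ===== CLAIM (what is proved, stated in full; the proofs are below) =====
def Claim_equal_get_type_name_rect : Prop := ∀ (type_name_rect_list : List String) (type_text : Option String) (name_text : Option String) (type_equal : Bool) (name_equal : Bool) (name_in : Option String) (just_name : Option String), Dom_get_type_name_rect type_name_rect_list type_text name_text type_equal name_equal name_in just_name → Pre_get_type_name_rect type_name_rect_list type_text name_text type_equal name_equal name_in just_name → Spec_get_type_name_rect type_name_rect_list type_text name_text type_equal name_equal name_in just_name (get_type_name_rect type_name_rect_list type_text name_text type_equal name_equal name_in just_name)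

-- ===== LEMMAS AND PROOFS =====

-- The type-condition and name-condition of one element, as B's masks compute them pointwise.
def pvTFun (type_text : Option String) (type_equal : Bool) (e : String) : Bool :=
  match type_text with
  | none => true
  | some t => (pvTypeOf e == t) == type_equal

def pvNFun (type_text name_text : Option String) (name_equal : Bool) (name_in just_name : Option String) (e : String) : Bool :=
  match name_text with
  | none => true
  | some nv =>
    let nm := if just_name = none then pvNameOf e else e
    if type_text = none ∧ name_equal = false ∧ name_in ≠ none then PySem.Str.isIn nv nm
    else (nm == nv) == name_equal

-- zip of a list with two masks built by map, filtered and projected, is a plain filter.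
lemma pvZipFilter (l : List String) (f g : String → Bool) :
    ((l.zip ((l.map f).zip (l.map g))).filter (fun p => p.2.1 && p.2.2)).map Prod.fst
      = l.filter (fun e => f e && g e) := by
  induction l with
  | nil => rfl
  | cons x xs ih =>
      simp only [List.map_cons, List.zip_cons_cons, List.filter_cons]
      by_cases h : (f x && g x) = true <;> simp [h, ih]

-- One iteration of A appends e exactly when both of B's mask conditions hold (and a filter mode is
-- selected), provided the local `type` is never read unassigned (just_name = none or type_text = none).
lemma pvStepA_eq (type_text : Option String) (name_text : Option String) (type_equal name_equal : Bool) (name_in just_name : Option String) (acc : List String) (e : String)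
    (h : just_name = none ∨ type_text = none) :
    pvStepA type_text name_text type_equal name_equal name_in just_name acc e =
      if (¬(type_text = none ∧ name_text = none) ∧
          pvTFun type_text type_equal e = true ∧
          pvNFun type_text name_text name_equal name_in just_name e = true)
      then acc ++ [e] else acc := by
  cases type_text with
  | none =>
      cases name_text with
      | none => simp [pvStepA, pvTFun, pvNFun]
      | some nt =>
          cases just_name with
          | none =>
              simp only [pvStepA, pvTFun, pvNFun]
              generalize pvNameOf e = N
              cases name_equal <;> cases name_in <;> simp <;> simp only [eq_comm]
          | some j =>
              simp only [pvStepA, pvTFun, pvNFun]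
              cases name_equal <;> cases name_in <;> simp <;> simp only [eq_comm]
  | some tt =>
      have hj : just_name = none := by
        rcases h with hj | hx
        · exact hj
        · exact absurd hx (by simp)
      subst hj
      simp only [pvStepA, pvTFun, pvNFun]
      generalize pvTypeOf e = T
      generalize pvNameOf e = N
      cases name_text with
      | none =>
          cases type_equal <;> simp <;> simp only [eq_comm]
      | some nt =>
          cases type_equal <;> cases name_equal <;> simp <;> simp only [eq_comm]

lemma pvFoldA_eq_filter (l : List String) (type_text : Option String) (name_text : Option String) (type_equal name_equal : Bool) (name_in just_name : Option String) (acc : List String)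
    (h : just_name = none ∨ type_text = none) :
    l.foldl (pvStepA type_text name_text type_equal name_equal name_in just_name) acc =
      acc ++ l.filter (fun e =>
        decide (¬(type_text = none ∧ name_text = none)) &&
        pvTFun type_text type_equal e &&
        pvNFun type_text name_text name_equal name_in just_name e) := by
  induction l generalizing acc with
  | nil => simp
  | cons x xs ih =>
      rw [List.foldl_cons, pvStepA_eq _ _ _ _ _ _ _ _ h, List.filter_cons]
      by_cases h1 : (type_text = none ∧ name_text = none)
      · rw [if_neg (by simp [h1.1, h1.2]), ih]
        simp [h1.1, h1.2]
      · by_cases h2 : pvTFun type_text type_equal x = true <;>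
        by_cases h3 : pvNFun type_text name_text name_equal name_in just_name x = true <;>
          simp [h1, h2, h3, ih]

-- B's staged masks collapse to the same pointwise filter.
lemma pvTMask_eq (l : List String) (type_text : Option String) (type_equal : Bool) :
    pvTMask l type_text type_equal = l.map (pvTFun type_text type_equal) := by
  cases type_text with
  | none =>
      have h : pvTFun none type_equal = fun _ => true := rfl
      simp [pvTMask, h, List.map_const']
  | some t => simp [pvTMask, pvTFun]

lemma pvNMask_eq (l : List String) (type_text name_text : Option String) (name_equal : Bool) (name_in just_name : Option String) :
    pvNMask l type_text name_text name_equal name_in just_name = l.map (pvNFun type_text name_text name_equal name_in just_name) := by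
  cases name_text with
  | none =>
      have h : pvNFun type_text none name_equal name_in just_name = fun _ => true := rfl
      simp [pvNMask, h, List.map_const']
  | some nv =>
      by_cases hc : (type_text = none ∧ name_equal = false ∧ name_in ≠ none) <;>
        cases just_name <;>
          simp [pvNMask, pvNFun, pvNames, hc, List.map_map, Function.comp]

lemma pvAlt_eq_filter (l : List String) (type_text : Option String) (name_text : Option String) (type_equal name_equal : Bool) (name_in just_name : Option String) :
    get_type_name_rect_alt l type_text name_text type_equal name_equal name_in just_name =
      l.filter (fun e =>
        decide (¬(type_text = none ∧ name_text = none)) &&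
        pvTFun type_text type_equal e &&
        pvNFun type_text name_text name_equal name_in just_name e) := by
  unfold get_type_name_rect_alt
  by_cases hb : (type_text = none ∧ name_text = none)
  · simp [hb.1, hb.2]
  · rw [if_neg hb, pvTMask_eq, pvNMask_eq, pvZipFilter]
    apply List.filter_congr; intro e _
    simp [hb]

-- ===== VERDICT (by name: the statement is the Claim_ definition above) =====
theorem get_type_name_rect_spec : Claim_equal_get_type_name_rect := by
  intro l tt nt te ne ni jn _ hpre
  unfold Spec_get_type_name_rect get_type_name_rect
  rw [pvAlt_eq_filter]
  by_cases hj : jn = none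
  · rw [pvFoldA_eq_filter _ _ _ _ _ _ _ _ (Or.inl hj)]; simp
  · by_cases ht : tt = none
    · rw [pvFoldA_eq_filter _ _ _ _ _ _ _ _ (Or.inr ht)]; simp
    · have hl : l = [] := hpre.2 hj ht
      subst hl; simp
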